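-- pv_equiv track=rewrite | github.com/yutiansut/QUANTAXIS | QUANTAXIS/QAApplication/QAAnalysis.py | QA_backtest_calc_assets
-- ===== SOURCE A (Python) =====
-- def QA_backtest_calc_assets(trade_history, assets):
--     assets_d = []
--     trade_date = []
--     for i in range(0, len(trade_history), 1):
--         if trade_history[i][0] not in trade_date:
--             trade_date.append(trade_history[i][0])
--             assets_d.append(assets[i])
--         else:
--             assets_d.pop(-1)
--             assets_d.append(assets[i])
--
--     return assets_d
-- ===== SOURCE B (Python) =====
-- def QA_backtest_calc_assets(trade_history, assets):
--     # first pass: mark which rows start a date not seen before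
--     seen = set()
--     is_first = []
--     for row in trade_history:
--         d = row[0]
--         is_first.append(d not in seen)
--         seen.add(d)
--     # keep assets[i] exactly when the next row opens a new date; the last row always survives
--     out = []
--     for a, keep in zip(assets, is_first[1:]):
--         if keep:
--             out.append(a)
--     if trade_history:
--         out.append(assets[len(trade_history) - 1])
--     return out
-- ===== Notes on version B (the rewrite author's own statement) =====
-- stated objective: alternative
-- what changed: Replaces A's stateful pop/overwrite accumulator with a two-pass decomposition: one pass computes first-occurrence flags for the dates with a set, then assets[i] is kept exactly when the next row opens a new date (plus the final asset).
import Mathlib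
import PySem

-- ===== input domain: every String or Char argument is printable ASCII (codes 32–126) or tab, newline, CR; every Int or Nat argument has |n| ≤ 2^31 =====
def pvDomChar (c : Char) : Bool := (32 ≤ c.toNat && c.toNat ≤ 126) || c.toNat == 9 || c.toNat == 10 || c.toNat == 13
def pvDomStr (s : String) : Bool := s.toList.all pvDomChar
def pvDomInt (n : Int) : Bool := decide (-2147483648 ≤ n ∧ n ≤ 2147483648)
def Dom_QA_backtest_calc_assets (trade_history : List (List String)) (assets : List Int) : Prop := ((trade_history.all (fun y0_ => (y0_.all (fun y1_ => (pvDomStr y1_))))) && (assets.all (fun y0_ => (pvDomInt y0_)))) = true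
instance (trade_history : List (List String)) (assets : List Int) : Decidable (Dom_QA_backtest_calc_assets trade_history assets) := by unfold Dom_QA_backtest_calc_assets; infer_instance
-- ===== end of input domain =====

-- B replaces A's pop/overwrite accumulator by first-occurrence flags plus a shifted filter (alternative decomposition, set membership instead of a list scan).

-- ===== PORT A =====
def QA_backtest_calc_assets (trade_history : List (List String)) (assets : List Int) : List Int :=
  ((PySem.List.pyRange 0 (trade_history.length : Int) 1).foldl
    (fun (st : List Int × List String) i =>
      let d := PySem.List.pyGetD (PySem.List.pyGetD trade_history i []) 0 ""
      if st.2.contains d = false then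
        (st.1 ++ [PySem.List.pyGetD assets i 0], st.2 ++ [d])
      else
        (st.1.dropLast ++ [PySem.List.pyGetD assets i 0], st.2))
    ([], [])).1

-- ===== PORT B =====
def QA_backtest_calc_assets_alt (trade_history : List (List String)) (assets : List Int) : List Int :=
  let st := trade_history.foldl
    (fun (st : PySem.Set String × List Bool) row =>
      let d := PySem.List.pyGetD row 0 ""
      (PySem.Set.add st.1 d, st.2 ++ [!(PySem.Set.contains st.1 d)]))
    (PySem.Set.empty, [])
  let out := (assets.zip (PySem.List.slice st.2 (some 1) none)).foldl
    (fun (out : List Int) p => if p.2 then out ++ [p.1] else out) []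
  if trade_history.isEmpty = false then
    out ++ [PySem.List.pyGetD assets ((trade_history.length : Int) - 1) 0]
  else out

-- ===== PRECONDITION & SPEC =====
-- Pre_ excludes exactly the inputs where Python A raises IndexError: a row of
-- trade_history that is empty (row[0]), or assets shorter than trade_history (assets[i]).
def Pre_QA_backtest_calc_assets (trade_history : List (List String)) (assets : List Int) : Prop :=
  trade_history.length ≤ assets.length ∧ ∀ row ∈ trade_history, row ≠ []
instance (trade_history : List (List String)) (assets : List Int) : Decidable (Pre_QA_backtest_calc_assets trade_history assets) := by unfold Pre_QA_backtest_calc_assets; infer_instance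

def pvWitness_QA_backtest_calc_assets : List (List String) × List Int :=
  ([["a"], ["b"], ["a"], ["c"]], [1, 2, 3, 4])

def Spec_QA_backtest_calc_assets (trade_history : List (List String)) (assets : List Int) (out : List Int) : Prop := out = QA_backtest_calc_assets_alt trade_history assets
instance (trade_history : List (List String)) (assets : List Int) (out : List Int) : Decidable (Spec_QA_backtest_calc_assets trade_history assets out) := by unfold Spec_QA_backtest_calc_assets; infer_instance

-- ===== CLAIM (what is proved, stated in full; the proofs are below) =====
def Claim_equal_QA_backtest_calc_assets : Prop := ∀ (trade_history : List (List String)) (assets : List Int), Dom_QA_backtest_calc_assets trade_history assets → Pre_QA_backtest_calc_assets trade_history assets → Spec_QA_backtest_calc_assets trade_history assets (QA_backtest_calc_assets trade_history assets)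

-- ===== LEMMAS AND PROOFS =====

-- date of a row, as both ports read it
def pvDOf (r : List String) : String := PySem.List.pyGetD r 0 ""

-- A's loop body, on a (row, asset) pair
def pvStepA (st : List Int × List String) (p : List String × Int) : List Int × List String :=
  if st.2.contains (pvDOf p.1) = false then (st.1 ++ [p.2], st.2 ++ [pvDOf p.1])
  else (st.1.dropLast ++ [p.2], st.2)

-- first-occurrence flags of the rows' dates, given already-seen dates s
def pvFlags : List (List String) → PySem.Set String → List Bool
  | [], _ => []
  | r :: th, s => (!(PySem.Set.contains s (pvDOf r))) :: pvFlags th (PySem.Set.add s (pvDOf r))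

-- the common middle form: value kept per segment (next row opens a new date, or last row)
def pvFb : List (List String × Int) → PySem.Set String → List Int
  | [], _ => []
  | p :: ps, s =>
      (match ps with
       | [] => [p.2]
       | q :: _ => if (PySem.Set.contains (PySem.Set.add s (pvDOf p.1)) (pvDOf q.1)) = false then [p.2] else [])
      ++ pvFb ps (PySem.Set.add s (pvDOf p.1))

lemma pvFlags_length (th : List (List String)) : ∀ s, (pvFlags th s).length = th.length := by
  induction th with
  | nil => intro s; rfl
  | cons r th ih => intro s; simp [pvFlags, ih]

-- A's fold over (row, asset) pairs equals pvFb, up to the one-slot overwrite at the front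
lemma pvL1 (ps : List (List String × Int)) : ∀ (acc : List Int) (dates : List String),
    (ps.foldl pvStepA (acc, dates)).1 =
      (match ps with
       | [] => acc
       | p :: _ => if dates.contains (pvDOf p.1) then acc.dropLast else acc) ++ pvFb ps dates := by
  induction ps with
  | nil => intro acc dates; simp [pvFb]
  | cons p ps ih =>
    intro acc dates
    rw [List.foldl_cons]
    cases hc : dates.contains (pvDOf p.1) with
    | false =>
      have hm : pvDOf p.1 ∉ dates := by simpa using hc
      have hadd : PySem.Set.add dates (pvDOf p.1) = dates ++ [pvDOf p.1] := by
        simp [PySem.Set.add, hm]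
      have hstep : pvStepA (acc, dates) p = (acc ++ [p.2], dates ++ [pvDOf p.1]) := by
        simp [pvStepA, hm]
      rw [hstep, ih]
      cases ps with
      | nil => simp [pvFb, hm]
      | cons q ps' =>
        by_cases hm2 : pvDOf q.1 ∈ dates ++ [pvDOf p.1]
        · simp [pvFb, hm, hm2]
        · simp [pvFb, hm, hm2]
    | true =>
      have hm : pvDOf p.1 ∈ dates := by simpa using hc
      have hadd : PySem.Set.add dates (pvDOf p.1) = dates := by
        simp [PySem.Set.add, hm]
      have hstep : pvStepA (acc, dates) p = (acc.dropLast ++ [p.2], dates) := by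
        simp [pvStepA, hm]
      rw [hstep, ih]
      cases ps with
      | nil => simp [pvFb, hm]
      | cons q ps' =>
        by_cases hm2 : pvDOf q.1 ∈ dates
        · simp [pvFb, hm, hm2]
        · simp [pvFb, hm, hm2]

-- snoc form of zip when the right list is strictly longer
lemma pvZipSnoc (l : List (List String)) : ∀ (as : List Int) (r : List String)
    (h : l.length < as.length),
    (l ++ [r]).zip as = l.zip as ++ [(r, as[l.length])] := by
  induction l with
  | nil =>
    intro as r h
    cases as with
    | nil => simp at h
    | cons a as' => simp
  | cons x l ih =>
    intro as r h
    cases as with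
    | nil => simp at h
    | cons a as' =>
      have h' : l.length < as'.length := by simp at h; omega
      simp only [List.cons_append, List.zip_cons_cons]
      rw [ih as' r h']
      simp

-- A's indexed loop equals the structural fold over the zipped lists
lemma pvZ (th : List (List String)) (as : List Int) (h : th.length ≤ as.length) :
    ∀ init, (PySem.List.pyRange 0 (th.length : Int) 1).foldl
      (fun st i => pvStepA st (PySem.List.pyGetD th i [], PySem.List.pyGetD as i 0)) init
    = (th.zip as).foldl pvStepA init := by
  induction th using List.reverseRecOn with
  | nil => intro init; simp [PySem.List.pyRange_one_eq_nil]
  | append_singleton l r ih =>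
    intro init
    have hl : l.length < as.length := by simp at h; omega
    have hcast : ((l ++ [r]).length : Int) = (l.length : Int) + 1 := by simp
    rw [hcast, PySem.List.pyRange_one_succ_right (by positivity), List.foldl_append]
    have hcongr : (PySem.List.pyRange 0 (l.length : Int) 1).foldl
        (fun st i => pvStepA st (PySem.List.pyGetD (l ++ [r]) i [], PySem.List.pyGetD as i 0)) init
        = (PySem.List.pyRange 0 (l.length : Int) 1).foldl
        (fun st i => pvStepA st (PySem.List.pyGetD l i [], PySem.List.pyGetD as i 0)) init := by
      apply PySem.List.foldl_congr_mem
      intro acc x hx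
      rw [PySem.List.mem_pyRange_one] at hx
      obtain ⟨k, rfl⟩ : ∃ k : Nat, x = (k : Int) := ⟨x.toNat, (Int.toNat_of_nonneg hx.1).symm⟩
      have hk : k < l.length := by omega
      have hk2 : k < as.length := by omega
      simp [PySem.List.pyGetD_natCast, List.getD, List.getElem?_append_left hk, hk]
    rw [hcongr, ih (by omega)]
    rw [pvZipSnoc l as r hl, List.foldl_append]
    simp only [List.foldl_cons, List.foldl_nil]
    congr 1
    simp [PySem.List.pyGetD_natCast, List.getD, hl]

-- B's first loop computes pvFlags
lemma pvF (th : List (List String)) : ∀ (s : PySem.Set String) (l : List Bool),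
    (th.foldl (fun (st : PySem.Set String × List Bool) row =>
      (PySem.Set.add st.1 (PySem.List.pyGetD row 0 ""),
       st.2 ++ [!(PySem.Set.contains st.1 (PySem.List.pyGetD row 0 ""))])) (s, l)).2
    = l ++ pvFlags th s := by
  induction th with
  | nil => intro s l; simp [pvFlags]
  | cons r th ih =>
    intro s l
    simp only [List.foldl_cons]
    rw [ih]
    simp [pvFlags, pvDOf]

-- pvFb in B's shape: filter the asset values by the shifted flags, then the final value
lemma pvL2 (ps : List (List String × Int)) : ∀ (p0 : List String × Int) (s : PySem.Set String),
    pvFb (p0 :: ps) s =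
      ((((p0 :: ps).map Prod.snd).zip ((pvFlags ((p0 :: ps).map Prod.fst) s).drop 1)).filter
        (fun q => q.2)).map Prod.fst
      ++ [((p0 :: ps).getLast (by simp)).2] := by
  induction ps with
  | nil => intro p0 s; simp [pvFb, pvFlags]
  | cons q ps' ih =>
    intro p0 s
    have hfb : pvFb (p0 :: q :: ps') s =
        (if (PySem.Set.contains (PySem.Set.add s (pvDOf p0.1)) (pvDOf q.1)) = false
         then [p0.2] else []) ++ pvFb (q :: ps') (PySem.Set.add s (pvDOf p0.1)) := rfl
    rw [hfb, ih q (PySem.Set.add s (pvDOf p0.1))]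
    simp only [List.map_cons, pvFlags, List.drop_succ_cons, List.drop_zero,
      List.zip_cons_cons, List.filter_cons]
    cases hq : PySem.Set.contains (PySem.Set.add s (pvDOf p0.1)) (pvDOf q.1) <;>
      simp [List.getLast_cons]

-- zip ignores elements of the left list beyond the right list's length
lemma pvZipTake (xs : List Int) : ∀ (ys : List Bool) (k : Nat), ys.length ≤ k →
    (xs.take k).zip ys = xs.zip ys := by
  induction xs with
  | nil => intro ys k h; simp
  | cons x xs ih =>
    intro ys k h
    cases ys with
    | nil => simp
    | cons y ys' =>
      cases k with
      | zero => simp at h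
      | succ k' => simp [List.take_succ_cons, ih ys' k' (by simpa using h)]

lemma pvMapSndZip (th : List (List String)) : ∀ (as : List Int), th.length ≤ as.length →
    (th.zip as).map Prod.snd = as.take th.length := by
  induction th with
  | nil => intro as h; simp
  | cons r th ih =>
    intro as h
    cases as with
    | nil => simp at h
    | cons a as' => simp [ih as' (by simpa using h)]

-- ===== VERDICT (by name: the statement is the Claim_ definition above) =====
theorem QA_backtest_calc_assets_spec : Claim_equal_QA_backtest_calc_assets := by
  intro th as _ hpre
  obtain ⟨hlen, _⟩ := hpre
  unfold Spec_QA_backtest_calc_assets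
  cases th with
  | nil =>
    simp [QA_backtest_calc_assets, QA_backtest_calc_assets_alt,
      PySem.List.pyRange_one_eq_nil, PySem.List.slice_from_one]
  | cons r th' =>
    cases as with
    | nil => simp at hlen
    | cons a as' =>
      -- A side: indexed loop → structural fold → pvFb
      have hA : QA_backtest_calc_assets (r :: th') (a :: as')
          = (((r :: th').zip (a :: as')).foldl pvStepA ([], [])).1 :=
        congrArg Prod.fst (pvZ (r :: th') (a :: as') hlen ([], []))
      have hA2 : QA_backtest_calc_assets (r :: th') (a :: as')
          = pvFb ((r, a) :: th'.zip as') PySem.Set.empty := by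
        rw [hA, pvL1]
        simp [PySem.Set.empty]
      -- B side: flags pass + filter pass
      have hfold := pvF (r :: th') PySem.Set.empty []
      have hB : QA_backtest_calc_assets_alt (r :: th') (a :: as') =
          ((((a :: as').zip ((pvFlags (r :: th') PySem.Set.empty).drop 1)).filter
            (fun q => q.2)).map Prod.fst)
          ++ [PySem.List.pyGetD (a :: as') (((r :: th').length : Int) - 1) 0] := by
        unfold QA_backtest_calc_assets_alt
        simp only [hfold, List.nil_append, PySem.List.slice_from_one, List.isEmpty_cons,
          ← List.drop_one]
        rw [PySem.List.foldl_append_if]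
        simp
      rw [hA2, hB, pvL2]
      -- align the two shapes
      have hfst : ((r, a) :: th'.zip as').map Prod.fst = r :: th' := by
        have := List.map_fst_zip (l₁ := r :: th') (l₂ := a :: as') hlen
        simpa using this
      have hsnd : ((r, a) :: th'.zip as').map Prod.snd = (a :: as').take (r :: th').length := by
        have := pvMapSndZip (r :: th') (a :: as') hlen
        simpa using this
      have hflen : ((pvFlags (r :: th') PySem.Set.empty).drop 1).length ≤ (r :: th').length := by
        simp [pvFlags_length]
      have hzip2 : (((a :: as').take (r :: th').length).zip
            ((pvFlags (r :: th') PySem.Set.empty).drop 1))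
          = (a :: as').zip ((pvFlags (r :: th') PySem.Set.empty).drop 1) :=
        pvZipTake _ _ _ hflen
      have hlast : ((((r, a) :: th'.zip as').getLast (by simp)).2 : Int)
          = PySem.List.pyGetD (a :: as') (((r :: th').length : Int) - 1) 0 := by
        have hn : (((r :: th').length : Int) - 1) = (((r :: th').length - 1 : Nat) : Int) := by
          simp
        have hlt : (r :: th').length - 1 < (a :: as').length := by
          simp at hlen ⊢; omega
        rw [hn, PySem.List.pyGetD_natCast, List.getD_eq_getElem _ _ hlt]
        rw [List.getLast_eq_getElem]
        have hlz : ((r, a) :: th'.zip as').length = (r :: th').length := by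
          have h1 : (th'.zip as').length = min th'.length as'.length := List.length_zip
          simp at hlen ⊢; omega
        simp only [hlz]
        have hlt2 : (r :: th').length - 1 < ((r :: th').zip (a :: as')).length := by
          rw [List.length_zip]; simp at hlen ⊢; omega
        calc (((r, a) :: th'.zip as')[(r :: th').length - 1]'(by rw [hlz]; exact Nat.sub_lt (by simp) one_pos)).2
            = (((r :: th').zip (a :: as'))[(r :: th').length - 1]'hlt2).2 := by
              simp [List.zip_cons_cons]
          _ = (a :: as')[(r :: th').length - 1] := by
              rw [List.getElem_zip]
      rw [hfst, hsnd, hzip2, hlast]
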